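-- pv_equiv track=rewrite | github.com/BartKlak/Bioinformatics | Frequency.py | NumberToPattern
-- ===== SOURCE A (Python) =====
-- def NumberToPattern(index, k):
--     if k == 1:
--         return NumberToSymbol(index)
--     prefixIndex = Quotient(index, 4)
--     r = Reminder(index, 4)
--     symbol = NumberToSymbol(r)
--     PrefixPattern = NumberToPattern(prefixIndex, k - 1)
--     return PrefixPattern + symbol
--
-- def NumberToSymbol(Number):
--     if Number == 0:
--         return "A"
--     elif Number == 1:
--         return "C"
--     elif Number == 2:
--         return "G"
--     elif Number == 3:
--         return "T"
--
-- def Reminder(n, m):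
--     reminder = n % m
--     return reminder
--
-- def Quotient(n, m):
--     quotient = n // m
--     return quotient
-- ===== SOURCE B (Python) =====
-- def NumberToPattern(index, k):
--     suffix = ""
--     i = index
--     for _ in range(k - 1):
--         suffix = NumberToSymbol(i % 4) + suffix
--         i = i // 4
--     return NumberToSymbol(i) + suffix
--
-- def NumberToSymbol(Number):
--     if Number == 0:
--         return "A"
--     elif Number == 1:
--         return "C"
--     elif Number == 2:
--         return "G"
--     elif Number == 3:
--         return "T"
-- ===== Notes on version B (the rewrite author's own statement) =====
-- stated objective: simpler
-- what changed: Replaces the recursion on k by a single iterative loop that peels off low-order base-4 digits with % and //, prepending each symbol to an accumulator string.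
-- outside the precondition, e.g. on NumberToPattern(5, 1): A returns None, B raises TypeError; on NumberToPattern(20, 2): A raises TypeError, B raises TypeError
import Mathlib
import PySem

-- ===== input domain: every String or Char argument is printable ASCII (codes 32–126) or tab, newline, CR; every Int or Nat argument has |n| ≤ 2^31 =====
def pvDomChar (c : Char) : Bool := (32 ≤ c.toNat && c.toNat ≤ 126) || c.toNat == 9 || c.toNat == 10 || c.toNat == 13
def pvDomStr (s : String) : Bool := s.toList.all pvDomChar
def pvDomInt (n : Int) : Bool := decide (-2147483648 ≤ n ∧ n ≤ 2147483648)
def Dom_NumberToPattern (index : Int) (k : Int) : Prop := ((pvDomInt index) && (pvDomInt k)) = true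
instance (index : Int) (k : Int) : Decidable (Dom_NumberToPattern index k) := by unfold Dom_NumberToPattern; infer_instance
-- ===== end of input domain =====

-- B replaces A's recursion on k by an iterative digit-peeling loop (objective: simpler).

-- ===== PORT A =====
-- Python's NumberToSymbol returns None for arguments outside 0..3; such inputs are outside
-- Pre_NumberToPattern, "" is a placeholder there.
def NumberToSymbol (Number : Int) : String :=
  if Number = 0 then "A"
  else if Number = 1 then "C"
  else if Number = 2 then "G"
  else if Number = 3 then "T"
  else ""

def Reminder (n : Int) (m : Int) : Int := PySem.Int.mod n m

def Quotient' (n : Int) (m : Int) : Int := PySem.Int.floordiv n m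

-- A recurses with k-1 until k == 1; for k ≤ 0 Python diverges (RecursionError), outside Pre_.
-- We recurse on the Nat k.toNat, matching Python's recursion step for step when k ≥ 1.
def NumberToPatternGo (index : Int) : Nat → String
  | 0 => ""          -- unreachable under Pre_ (Python diverges for k ≤ 0)
  | 1 => NumberToSymbol index
  | n + 2 =>
    let prefixIndex := Quotient' index 4
    let r := Reminder index 4
    let symbol := NumberToSymbol r
    let PrefixPattern := NumberToPatternGo prefixIndex (n + 1)
    PrefixPattern ++ symbol

def NumberToPattern (index : Int) (k : Int) : String := NumberToPatternGo index k.toNat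

-- ===== PORT B =====
def NumberToPattern_alt (index : Int) (k : Int) : String :=
  let st := (PySem.List.pyRange 0 (k - 1) 1).foldl
    (fun (st : String × Int) _ =>
      (NumberToSymbol (PySem.Int.mod st.2 4) ++ st.1, PySem.Int.floordiv st.2 4))
    ("", index)
  NumberToSymbol st.2 ++ st.1

-- ===== PRECONDITION & SPEC =====
-- Pre_: exactly the inputs on which Python's A returns a string, i.e. 1 ≤ k (for k ≤ 0 A
-- diverges with RecursionError) and 0 ≤ index < 4^k (otherwise the leading base-4 digit is
-- outside 0..3, so A returns None for k = 1 and raises TypeError for k ≥ 2).  The bound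
-- 'index < 4^k' is written as '16 ≤ k ∨ index < 4^k.toNat': on Dom, index ≤ 2^31 < 4^16 ≤ 4^k
-- whenever 16 ≤ k, so the two are equivalent (nothing A returns on is excluded); this form
-- merely lets the instance evaluate without computing astronomically large powers.
def Pre_NumberToPattern (index : Int) (k : Int) : Prop :=
  1 ≤ k ∧ 0 ≤ index ∧ (16 ≤ k ∨ index < (4 : Int) ^ k.toNat)
instance (index : Int) (k : Int) : Decidable (Pre_NumberToPattern index k) := by
  unfold Pre_NumberToPattern; infer_instance

def pvWitness_NumberToPattern : Int × Int := (11, 3)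

def Spec_NumberToPattern (index : Int) (k : Int) (out : String) : Prop := out = NumberToPattern_alt index k
instance (index : Int) (k : Int) (out : String) : Decidable (Spec_NumberToPattern index k out) := by unfold Spec_NumberToPattern; infer_instance

-- ===== CLAIM (what is proved, stated in full; the proofs are below) =====
def Claim_equal_NumberToPattern : Prop := ∀ (index : Int) (k : Int), Dom_NumberToPattern index k → Pre_NumberToPattern index k → Spec_NumberToPattern index k (NumberToPattern index k)


-- ===== LEMMAS AND PROOFS =====

-- The body of B's loop, and its n-fold iteration.
def pvStep (st : String × Int) : String × Int :=
  (NumberToSymbol (PySem.Int.mod st.2 4) ++ st.1, PySem.Int.floordiv st.2 4)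

def pvIter : Nat → (String × Int) → String × Int
  | 0, st => st
  | n + 1, st => pvIter n (pvStep st)

theorem pv_foldl_eq_iter (l : List Int) (st : String × Int) :
    l.foldl (fun (st : String × Int) _ =>
      (NumberToSymbol (PySem.Int.mod st.2 4) ++ st.1, PySem.Int.floordiv st.2 4)) st
      = pvIter l.length st := by
  induction l generalizing st with
  | nil => rfl
  | cons x t ih => simpa [pvIter, pvStep] using ih (pvStep st)

theorem pv_iter_carry (n : Nat) (s : String) (i : Int) :
    pvIter n (s, i) = ((pvIter n ("", i)).1 ++ s, (pvIter n ("", i)).2) := by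
  induction n generalizing s i with
  | zero => simp [pvIter]
  | succ n ih =>
    simp only [pvIter, pvStep]
    rw [ih (NumberToSymbol (PySem.Int.mod i 4) ++ s), ih (NumberToSymbol (PySem.Int.mod i 4) ++ "")]
    simp [String.append_assoc]

theorem pv_go_eq_iter (n : Nat) (i : Int) :
    NumberToPatternGo i (n + 1)
      = NumberToSymbol (pvIter n ("", i)).2 ++ (pvIter n ("", i)).1 := by
  induction n generalizing i with
  | zero => simp [NumberToPatternGo, pvIter]
  | succ n ih =>
    show NumberToPatternGo (Quotient' i 4) (n + 1) ++ NumberToSymbol (Reminder i 4) = _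
    rw [ih (Quotient' i 4)]
    simp only [pvIter, pvStep]
    rw [pv_iter_carry n (NumberToSymbol (PySem.Int.mod i 4) ++ "") (PySem.Int.floordiv i 4)]
    simp [Quotient', Reminder, String.append_assoc]

-- ===== VERDICT (by name: the statement is the Claim_ definition above) =====
theorem NumberToPattern_spec : Claim_equal_NumberToPattern := by
  intro index k _ hpre
  obtain ⟨hk1, -, -⟩ := hpre
  unfold Spec_NumberToPattern NumberToPattern NumberToPattern_alt
  rw [pv_foldl_eq_iter, PySem.List.length_pyRange_one]
  have hk : k.toNat = (k - 1 - 0).toNat + 1 := by omega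
  rw [hk, pv_go_eq_iter]
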